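-- pv_equiv track=rewrite | github.com/PiRobot2021/Crypto | Myskowski.py | to_index
-- ===== SOURCE A (Python) =====
-- def to_index(key):
--     sorted_key_chars = sorted(key)
--     ascending_int = range(len(key))
--     ordered_key = list(zip(sorted_key_chars, ascending_int))                        # List of tuples containing sorted key chars and growing int values by steps of 1
--     result = []
--     for x in key:
--         for y in ordered_key:
--             if y[0] == x:
--                 result.append(y)
--                 ordered_key.remove(y)                                               # Removing the tuple from the ordered_key to avoid duplications in the next key values
--                 break                                                               # Once value is found, stop rotating through the ordered_keys
--     return result
-- ===== SOURCE B (Python) =====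
-- def to_index(key):
--     ranks = {}
--     for i, c in enumerate(sorted(key)):
--         ranks.setdefault(c, []).append(i)
--     nxt = {}
--     out = []
--     for c in key:
--         j = nxt.get(c, 0)
--         nxt[c] = j + 1
--         out.append((c, ranks[c][j]))
--     return out
-- ===== Notes on version B (the rewrite author's own statement) =====
-- stated objective: faster
-- what changed: Replaces A's inner scan-and-remove over the shrinking sorted pair list with a dict of per-character rank queues built once from the sorted key, consumed by a cursor while scanning the key.
import Mathlib
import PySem

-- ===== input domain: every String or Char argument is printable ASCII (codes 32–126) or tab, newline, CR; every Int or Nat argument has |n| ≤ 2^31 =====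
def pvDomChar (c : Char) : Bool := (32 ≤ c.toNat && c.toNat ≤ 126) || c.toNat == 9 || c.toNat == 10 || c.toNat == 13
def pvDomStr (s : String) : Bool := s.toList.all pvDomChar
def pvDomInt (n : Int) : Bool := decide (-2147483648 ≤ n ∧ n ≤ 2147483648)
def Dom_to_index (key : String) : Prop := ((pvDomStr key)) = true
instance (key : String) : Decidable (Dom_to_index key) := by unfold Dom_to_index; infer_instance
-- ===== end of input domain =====

-- B replaces A's quadratic scan-and-remove over a shrinking sorted pair list with a dict of per-character rank queues built once from the sorted key, consumed by a cursor (measured faster).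


-- ===== PORT A =====
-- A's inner 'for y in ordered_key: if y[0] == x: append; remove; break': the remove hits the
-- matched tuple itself (the int components are pairwise distinct, so the first tuple equal to
-- y IS y); findRemoveA returns the first pair with fst = x and the list with that pair removed.
def findRemoveA (x : String) : List (String × Int) → Option (String × Int) × List (String × Int)
  | [] => (none, [])
  | y :: ys =>
    if y.1 == x then (some y, ys)
    else
      let r := findRemoveA x ys
      (r.1, y :: r.2)

def to_index (key : String) : List (String × Int) :=
  let chars := key.toList.map (fun c => String.ofList [c])      -- iterating a Python str yields 1-char strings
  let sortedKeyChars := PySem.List.sorted chars (fun s => s) false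
  let orderedKey := sortedKeyChars.zip (PySem.List.pyRange 0 (chars.length : Int) 1)
  (chars.foldl
    (fun st x =>
      match findRemoveA x st.1 with
      | (some y, rest) => (rest, st.2 ++ [y])
      | (none, _) => (st.1, st.2))
    (orderedKey, ([] : List (String × Int)))).2

-- ===== PORT B =====
def to_index_alt (key : String) : List (String × Int) :=
  let chars := key.toList.map (fun c => String.ofList [c])
  -- ranks.setdefault(c, []).append(i)  for i, c in enumerate(sorted(key))
  let ranks : PySem.Dict String (List Int) :=
    (PySem.List.enumerate (PySem.List.sorted chars (fun s => s) false)).foldl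
      (fun d p => d.modify p.2 [] (fun l => l ++ [p.1])) PySem.Dict.empty
  -- j = nxt.get(c, 0); nxt[c] = j + 1; out.append((c, ranks[c][j]))
  -- (ranks[c] and ranks[c][j] never miss, so the getD/pyGetD defaults are unreachable)
  (chars.foldl
    (fun (st : PySem.Dict String Int × List (String × Int)) c =>
      let j := st.1.getD c 0
      (st.1.insert c (j + 1), st.2 ++ [(c, PySem.List.pyGetD (ranks.getD c []) j 0)]))
    (PySem.Dict.empty, ([] : List (String × Int)))).2

-- ===== PRECONDITION & SPEC =====
def Spec_to_index (key : String) (out : List (String × Int)) : Prop := out = to_index_alt key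
instance (key : String) (out : List (String × Int)) : Decidable (Spec_to_index key out) := by unfold Spec_to_index; infer_instance

-- ===== CLAIM (what is proved, stated in full; the proofs are below) =====
def Claim_equal_to_index : Prop := ∀ (key : String), Dom_to_index key → Spec_to_index key (to_index key)

-- ===== LEMMAS AND PROOFS =====

lemma findRemoveA_cons_filter (x : String) (l : List (String × Int)) (y : String × Int)
    (ys : List (String × Int)) (h : l.filter (fun z => z.1 == x) = y :: ys) :
    (findRemoveA x l).1 = some y ∧
    (findRemoveA x l).2.filter (fun z => z.1 == x) = ys ∧
    (∀ c, c ≠ x → (findRemoveA x l).2.filter (fun z => z.1 == c) = l.filter (fun z => z.1 == c)) := by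
  induction l generalizing y ys with
  | nil => simp at h
  | cons a l ih =>
    simp only [List.filter_cons] at h
    by_cases ha : (a.1 == x) = true
    · simp only [ha, if_true] at h
      injection h with hy hys
      subst hy
      refine ⟨by simp [findRemoveA, ha], by simp [findRemoveA, ha, hys], ?_⟩
      intro c hc
      have hax : (a.1 == c) = false := by
        rw [eq_of_beq ha]
        exact beq_eq_false_iff_ne.2 (Ne.symm hc)
      simp [findRemoveA, ha, hax]
    · simp only [ha, Bool.false_eq_true, if_false] at h
      obtain ⟨h1, h2, h3⟩ := ih y ys h
      refine ⟨by simp [findRemoveA, ha, h1], ?_, ?_⟩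
      · simp [findRemoveA, ha, h2]
      · intro c hc
        simp [findRemoveA, ha, List.filter_cons, h3 c hc]

lemma zip_pyRange_eq_map_swap (s : List String) : ∀ a : Int,
    s.zip (PySem.List.pyRange a (a + s.length) 1) = (PySem.List.enumerate s a).map Prod.swap := by
  induction s with
  | nil => intro a; simp [PySem.List.enumerate_nil]
  | cons x s ih =>
    intro a
    have hb : a < a + ((x :: s).length : Int) := by simp
    rw [PySem.List.pyRange_one_cons hb]
    have hlen : a + ((x :: s).length : Int) = (a + 1) + (s.length : Int) := by
      simp; ring
    rw [hlen, List.zip_cons_cons, ih (a + 1), PySem.List.enumerate_cons]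
    rfl

-- the loop invariant: A's surviving ordered_key per character = B's rank queue minus the cursor
lemma loop_eq (ranks : PySem.Dict String (List Int)) :
    ∀ (ks : List String) (ordered : List (String × Int)) (nxt : PySem.Dict String Int)
      (res : List (String × Int)),
    (∀ c : String, ∃ n : ℕ, nxt.getD c 0 = (n : Int) ∧
        (ordered.filter (fun y => y.1 == c)).map Prod.snd = (ranks.getD c []).drop n) →
    (∀ c : String, ks.count c ≤ (ordered.filter (fun y => y.1 == c)).length) →
    (ks.foldl
      (fun st x =>
        match findRemoveA x st.1 with
        | (some y, rest) => (rest, st.2 ++ [y])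
        | (none, _) => (st.1, st.2)) (ordered, res)).2
    = (ks.foldl
      (fun (st : PySem.Dict String Int × List (String × Int)) c =>
        let j := st.1.getD c 0
        (st.1.insert c (j + 1), st.2 ++ [(c, PySem.List.pyGetD (ranks.getD c []) j 0)]))
      (nxt, res)).2 := by
  intro ks
  induction ks with
  | nil => intro _ _ _ _ _; rfl
  | cons c ks ih =>
    intro ordered nxt res hInv hCnt
    have hc := hCnt c
    rw [List.count_cons_self] at hc
    cases hfil : ordered.filter (fun y => y.1 == c) with
    | nil => rw [hfil] at hc; simp at hc
    | cons y ys =>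
      obtain ⟨n, hn, hdrop⟩ := hInv c
      rw [hfil] at hdrop
      obtain ⟨h1, h2, h3⟩ := findRemoveA_cons_filter c ordered y ys hfil
      have hy1 : y.1 = c := by
        have hmem : y ∈ ordered.filter (fun z => z.1 == c) := by
          rw [hfil]; exact List.mem_cons_self ..
        exact eq_of_beq (List.mem_filter.1 hmem).2
      have hval : PySem.List.pyGetD (ranks.getD c []) (nxt.getD c 0) 0 = y.2 := by
        rw [hn, PySem.List.pyGetD_natCast]
        have hg : (ranks.getD c [])[n]? = some y.2 := by
          rw [← List.head?_drop, ← hdrop]; rfl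
        simp [List.getD_eq_getElem?_getD, hg]
      have hfr : findRemoveA c ordered = (some y, (findRemoveA c ordered).2) := by
        rw [← h1]
      have hyeq : (c, y.2) = y := by rw [← hy1]
      simp only [List.foldl_cons]
      rw [hfr, hval, hyeq]
      apply ih
      · intro c'
        by_cases hcc : c' = c
        · subst hcc
          refine ⟨n + 1, ?_, ?_⟩
          · rw [PySem.Dict.getD_insert_self, hn]; push_cast; ring
          · rw [h2, ← List.tail_drop, ← hdrop]; rfl
        · obtain ⟨m, hm1, hm2⟩ := hInv c'
          exact ⟨m, by rw [PySem.Dict.getD_insert_of_ne _ _ _ hcc, hm1],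
            by rw [h3 c' hcc, hm2]⟩
      · intro c'
        by_cases hcc : c' = c
        · subst hcc
          rw [h2]
          have hcnt := hCnt c'
          rw [List.count_cons_self, hfil] at hcnt
          simp only [List.length_cons] at hcnt
          omega
        · rw [h3 c' hcc]
          have hcnt := hCnt c'
          simp only [List.count_cons, beq_iff_eq] at hcnt
          omega

-- ===== VERDICT (by name: the statement is the Claim_ definition above) =====
lemma main_aux (chars : List String) :
    (chars.foldl
      (fun st x =>
        match findRemoveA x st.1 with
        | (some y, rest) => (rest, st.2 ++ [y])
        | (none, _) => (st.1, st.2))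
      ((PySem.List.sorted chars (fun t => t) false).zip
        (PySem.List.pyRange 0 (chars.length : Int) 1), ([] : List (String × Int)))).2
    = (chars.foldl
      (fun (st : PySem.Dict String Int × List (String × Int)) c =>
        let j := st.1.getD c 0
        (st.1.insert c (j + 1),
          st.2 ++ [(c, PySem.List.pyGetD
            (((PySem.List.enumerate (PySem.List.sorted chars (fun t => t) false) 0).foldl
              (fun d p => d.modify p.2 [] (fun l => l ++ [p.1])) PySem.Dict.empty).getD c []) j 0)]))
      (PySem.Dict.empty, ([] : List (String × Int)))).2 := by
  generalize hs : PySem.List.sorted chars (fun t => t) false = s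
  have hlen : s.length = chars.length := by rw [← hs]; exact PySem.List.length_sorted ..
  have hperm : s.Perm chars := hs ▸ PySem.List.sorted_perm chars _ false
  have hzip : s.zip (PySem.List.pyRange 0 (chars.length : Int) 1)
      = (PySem.List.enumerate s 0).map Prod.swap := by
    rw [← hlen, show ((s.length : Nat) : Int) = 0 + (s.length : Int) by ring]
    exact zip_pyRange_eq_map_swap s 0
  have hranks : ∀ c : String,
      ((PySem.List.enumerate s 0).foldl
        (fun d p => d.modify p.2 [] (fun l => l ++ [p.1])) PySem.Dict.empty).getD c []
      = ((s.zip (PySem.List.pyRange 0 (chars.length : Int) 1)).filter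
          (fun y => y.1 == c)).map Prod.snd := by
    intro c
    have hfold : (PySem.List.enumerate s 0).foldl
        (fun d p => d.modify p.2 [] (fun l => l ++ [p.1])) PySem.Dict.empty
        = ((PySem.List.enumerate s 0).map Prod.swap).foldl
            (fun (d : PySem.Dict String (List Int)) p => d.modify p.1 [] (fun l => l ++ [p.2]))
            PySem.Dict.empty := by
      rw [List.foldl_map]
      rfl
    rw [hfold, PySem.Dict.getD_foldl_modify_append, hzip]
    simp [List.filter_map, List.map_map, Function.comp_def]
  refine loop_eq _ chars _ PySem.Dict.empty [] ?_ ?_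
  · intro c
    exact ⟨0, by simp, by rw [hranks c, List.drop_zero]⟩
  · intro c
    rw [hzip]
    have h1 : (((PySem.List.enumerate s 0).map Prod.swap).filter
        (fun y => y.1 == c)).length
        = (PySem.List.enumerate s 0).countP (fun p => p.2 == c) := by
      rw [List.filter_map, List.length_map, ← List.countP_eq_length_filter]
      rfl
    have h2 : (PySem.List.enumerate s 0).countP (fun p => p.2 == c) = s.count c := by
      conv_rhs => rw [← PySem.List.map_snd_enumerate s 0]
      simp only [List.count, List.countP_map]
      rfl
    have h3 : s.count c = chars.count c := hperm.count_eq c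
    rw [h1, h2, h3]

-- ===== VERDICT (by name: the statement is the Claim_ definition above) =====
theorem to_index_spec : Claim_equal_to_index := by
  intro key _
  unfold Spec_to_index to_index to_index_alt
  exact main_aux (key.toList.map (fun c => String.ofList [c]))
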